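-- pv_equiv track=rewrite | github.com/SoumadeepChoudhury/arith-tools | arithtools/__init__.py | two_digit_special
-- ===== SOURCE A (Python) =====
-- def two_digit_special(number) -> bool:
--     """It will check whether the entered number is a two digit special number or not."""
--     s = 0
--     n = number
--     p = 1
--     a = n
--     if(n > 9 and n < 100):
--         while(n != 0):
--             r = n % 10
--             p = p*r
--             s = s+r
--             n = n//10
--         if(s+p == a):
--             return True
--         else:
--             return False
--     else:
--         return False
-- ===== SOURCE B (Python) =====
-- def two_digit_special(number) -> bool:
--     """It will check whether the entered number is a two digit special number or not."""
--     if 9 < number < 100: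
--         tens, units = divmod(number, 10)
--         return (tens + units) + (tens * units) == number
--     return False
-- ===== Notes on version B (the rewrite author's own statement) =====
-- stated objective: simpler
-- what changed: Replaces the while-loop digit extraction with a single closed-form divmod: tens and units are computed directly and the check is one arithmetic expression, no loop state (s, p, r, n).
import Mathlib
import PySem

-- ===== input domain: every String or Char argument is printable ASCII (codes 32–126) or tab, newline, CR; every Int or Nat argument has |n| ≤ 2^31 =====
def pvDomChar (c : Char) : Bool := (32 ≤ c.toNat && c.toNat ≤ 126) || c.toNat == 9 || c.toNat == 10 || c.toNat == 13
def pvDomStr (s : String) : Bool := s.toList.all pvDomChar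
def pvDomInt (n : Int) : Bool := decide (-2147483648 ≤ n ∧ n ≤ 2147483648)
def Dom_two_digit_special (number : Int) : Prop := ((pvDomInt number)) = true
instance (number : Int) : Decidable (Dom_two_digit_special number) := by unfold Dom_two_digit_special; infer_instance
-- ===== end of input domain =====

-- B replaces A's while-loop digit extraction by a closed-form divmod (simpler, no loop state).


-- ===== PORT A =====
-- A's while-loop, with a fuel guard only to make it total (the loop is only
-- entered with 10 ≤ n ≤ 99, where it stops after exactly two iterations, so
-- fuel 100 is never exhausted on reachable inputs).
def twoLoopA (fuel : Nat) (n p s : Int) : Int × Int :=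
  match fuel with
  | 0 => (p, s)
  | fuel + 1 =>
    if n ≠ 0 then
      twoLoopA fuel (PySem.Int.floordiv n 10)
        (p * PySem.Int.mod n 10) (s + PySem.Int.mod n 10)
    else (p, s)

def two_digit_special (number : Int) : Bool :=
  if number > 9 ∧ number < 100 then
    let r := twoLoopA 100 number 1 0
    decide (r.2 + r.1 = number)
  else false

-- ===== PORT B =====
-- divmod(a, b) = (a // b, a % b); ported via PySem.Int.floordiv / mod (divisor 10 ≠ 0).
def two_digit_special_alt (number : Int) : Bool :=
  if 9 < number ∧ number < 100 then
    let tens := PySem.Int.floordiv number 10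
    let units := PySem.Int.mod number 10
    decide ((tens + units) + tens * units = number)
  else false

-- ===== PRECONDITION & SPEC =====
def Spec_two_digit_special (number : Int) (out : Bool) : Prop := out = two_digit_special_alt number
instance (number : Int) (out : Bool) : Decidable (Spec_two_digit_special number out) := by unfold Spec_two_digit_special; infer_instance

-- ===== CLAIM (what is proved, stated in full; the proofs are below) =====
def Claim_equal_two_digit_special : Prop := ∀ (number : Int), Dom_two_digit_special number → Spec_two_digit_special number (two_digit_special number)

-- ===== LEMMAS AND PROOFS =====

-- ===== VERDICT (by name: the statement is the Claim_ definition above) =====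
theorem two_digit_special_spec : Claim_equal_two_digit_special := by
  intro n _
  unfold Spec_two_digit_special
  by_cases h : 10 ≤ n ∧ n ≤ 99
  · obtain ⟨h1, h2⟩ := h
    interval_cases n <;> decide
  · have hA : ¬ (n > 9 ∧ n < 100) := by omega
    have hB : ¬ (9 < n ∧ n < 100) := by omega
    unfold two_digit_special two_digit_special_alt
    rw [if_neg hA, if_neg hB]
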